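-- pv_equiv track=rewrite | github.com/simraan9/dv.pset-simran | dv.pset/0068-Names Scores/namesscores.py | countLetterScore
-- ===== SOURCE A (Python) =====
-- def countLetterScore(a):
--     letters="0ABCDEFGHIJKLMNOPQRSTUVWXYZ"
--     count=0
--     for h in range (len(a)):
--         for i in range(len(letters)):
--             if letters[i]==a[h]:
--                 count=count+i
--
--     return count
-- ===== SOURCE B (Python) =====
-- def countLetterScore(a):
--     return sum(ord(c) - 64 for c in a if 'A' <= c <= 'Z')
-- ===== Notes on version B (the rewrite author's own statement) =====
-- stated objective: simpler
-- what changed: Replaced the nested scan over a 27-character lookup string with a single-pass closed-form sum ord(c)-64 over the uppercase letters of the input.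
import Mathlib
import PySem

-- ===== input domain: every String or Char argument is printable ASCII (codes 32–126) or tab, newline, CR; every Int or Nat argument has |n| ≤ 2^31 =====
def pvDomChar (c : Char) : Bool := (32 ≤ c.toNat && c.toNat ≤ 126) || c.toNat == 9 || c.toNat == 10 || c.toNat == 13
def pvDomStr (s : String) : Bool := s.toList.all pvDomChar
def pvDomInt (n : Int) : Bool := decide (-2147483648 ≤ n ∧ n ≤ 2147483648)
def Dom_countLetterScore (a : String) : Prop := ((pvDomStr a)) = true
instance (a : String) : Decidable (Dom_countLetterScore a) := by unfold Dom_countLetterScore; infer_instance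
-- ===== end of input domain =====

-- B replaces A's nested 27-character lookup scan with a single pass adding ord(c)-64 for each uppercase letter (objective: simpler).

-- ===== PORT A =====
def countLetterScore (a : String) : Int :=
  let letters : String := "0ABCDEFGHIJKLMNOPQRSTUVWXYZ"
  (PySem.List.pyRange 0 (PySem.Str.len a) 1).foldl (fun count h =>
    (PySem.List.pyRange 0 (PySem.Str.len letters) 1).foldl (fun count i =>
      if PySem.Str.pyGet? letters i == PySem.Str.pyGet? a h then count + i else count) count) 0

-- ===== PORT B =====
def countLetterScore_alt (a : String) : Int :=
  a.toList.foldl (fun acc c => if 'A' ≤ c ∧ c ≤ 'Z' then acc + ((c.toNat : Int) - 64) else acc) 0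

-- ===== PRECONDITION & SPEC =====
def Spec_countLetterScore (a : String) (out : Int) : Prop := out = countLetterScore_alt a
instance (a : String) (out : Int) : Decidable (Spec_countLetterScore a out) := by unfold Spec_countLetterScore; infer_instance

-- ===== CLAIM (what is proved, stated in full; the proofs are below) =====
def Claim_equal_countLetterScore : Prop := ∀ (a : String), Dom_countLetterScore a → Spec_countLetterScore a (countLetterScore a)

-- ===== LEMMAS AND PROOFS =====
def pvScore (c : Char) : Int := if 'A' ≤ c ∧ c ≤ 'Z' then (c.toNat : Int) - 64 else 0

theorem foldl_if_add (L : List Int) (p : Int → Bool) (acc : Int) :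
    L.foldl (fun count i => if p i then count + i else count) acc
    = acc + (L.map (fun i => if p i then i else 0)).sum := by
  induction L generalizing acc with
  | nil => simp
  | cons x xs ih => simp only [List.foldl_cons, List.map_cons, List.sum_cons, ih]; split_ifs <;> ring

set_option maxHeartbeats 1000000 in
theorem inner_score (c : Char) (acc : Int) :
    (PySem.List.pyRange 0 (PySem.Str.len "0ABCDEFGHIJKLMNOPQRSTUVWXYZ") 1).foldl
      (fun count i => if PySem.Str.pyGet? "0ABCDEFGHIJKLMNOPQRSTUVWXYZ" i == some c then count + i else count) acc
    = acc + pvScore c := by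
  have e0 : PySem.Str.pyGet? "0ABCDEFGHIJKLMNOPQRSTUVWXYZ" (0 : Int) = some '0' := by decide
  have e1 : PySem.Str.pyGet? "0ABCDEFGHIJKLMNOPQRSTUVWXYZ" (1 : Int) = some 'A' := by decide
  have e2 : PySem.Str.pyGet? "0ABCDEFGHIJKLMNOPQRSTUVWXYZ" (2 : Int) = some 'B' := by decide
  have e3 : PySem.Str.pyGet? "0ABCDEFGHIJKLMNOPQRSTUVWXYZ" (3 : Int) = some 'C' := by decide
  have e4 : PySem.Str.pyGet? "0ABCDEFGHIJKLMNOPQRSTUVWXYZ" (4 : Int) = some 'D' := by decide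
  have e5 : PySem.Str.pyGet? "0ABCDEFGHIJKLMNOPQRSTUVWXYZ" (5 : Int) = some 'E' := by decide
  have e6 : PySem.Str.pyGet? "0ABCDEFGHIJKLMNOPQRSTUVWXYZ" (6 : Int) = some 'F' := by decide
  have e7 : PySem.Str.pyGet? "0ABCDEFGHIJKLMNOPQRSTUVWXYZ" (7 : Int) = some 'G' := by decide
  have e8 : PySem.Str.pyGet? "0ABCDEFGHIJKLMNOPQRSTUVWXYZ" (8 : Int) = some 'H' := by decide
  have e9 : PySem.Str.pyGet? "0ABCDEFGHIJKLMNOPQRSTUVWXYZ" (9 : Int) = some 'I' := by decide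
  have e10 : PySem.Str.pyGet? "0ABCDEFGHIJKLMNOPQRSTUVWXYZ" (10 : Int) = some 'J' := by decide
  have e11 : PySem.Str.pyGet? "0ABCDEFGHIJKLMNOPQRSTUVWXYZ" (11 : Int) = some 'K' := by decide
  have e12 : PySem.Str.pyGet? "0ABCDEFGHIJKLMNOPQRSTUVWXYZ" (12 : Int) = some 'L' := by decide
  have e13 : PySem.Str.pyGet? "0ABCDEFGHIJKLMNOPQRSTUVWXYZ" (13 : Int) = some 'M' := by decide
  have e14 : PySem.Str.pyGet? "0ABCDEFGHIJKLMNOPQRSTUVWXYZ" (14 : Int) = some 'N' := by decide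
  have e15 : PySem.Str.pyGet? "0ABCDEFGHIJKLMNOPQRSTUVWXYZ" (15 : Int) = some 'O' := by decide
  have e16 : PySem.Str.pyGet? "0ABCDEFGHIJKLMNOPQRSTUVWXYZ" (16 : Int) = some 'P' := by decide
  have e17 : PySem.Str.pyGet? "0ABCDEFGHIJKLMNOPQRSTUVWXYZ" (17 : Int) = some 'Q' := by decide
  have e18 : PySem.Str.pyGet? "0ABCDEFGHIJKLMNOPQRSTUVWXYZ" (18 : Int) = some 'R' := by decide
  have e19 : PySem.Str.pyGet? "0ABCDEFGHIJKLMNOPQRSTUVWXYZ" (19 : Int) = some 'S' := by decide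
  have e20 : PySem.Str.pyGet? "0ABCDEFGHIJKLMNOPQRSTUVWXYZ" (20 : Int) = some 'T' := by decide
  have e21 : PySem.Str.pyGet? "0ABCDEFGHIJKLMNOPQRSTUVWXYZ" (21 : Int) = some 'U' := by decide
  have e22 : PySem.Str.pyGet? "0ABCDEFGHIJKLMNOPQRSTUVWXYZ" (22 : Int) = some 'V' := by decide
  have e23 : PySem.Str.pyGet? "0ABCDEFGHIJKLMNOPQRSTUVWXYZ" (23 : Int) = some 'W' := by decide
  have e24 : PySem.Str.pyGet? "0ABCDEFGHIJKLMNOPQRSTUVWXYZ" (24 : Int) = some 'X' := by decide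
  have e25 : PySem.Str.pyGet? "0ABCDEFGHIJKLMNOPQRSTUVWXYZ" (25 : Int) = some 'Y' := by decide
  have e26 : PySem.Str.pyGet? "0ABCDEFGHIJKLMNOPQRSTUVWXYZ" (26 : Int) = some 'Z' := by decide
  have hr : PySem.List.pyRange 0 (PySem.Str.len "0ABCDEFGHIJKLMNOPQRSTUVWXYZ") 1 = [0,1,2,3,4,5,6,7,8,9,10,11,12,13,14,15,16,17,18,19,20,21,22,23,24,25,26] := by decide
  rw [hr]
  rw [foldl_if_add]
  congr 1
  simp only [List.map_cons, List.map_nil, List.sum_cons, List.sum_nil, e0, e1, e2, e3, e4, e5, e6, e7, e8, e9, e10, e11, e12, e13, e14, e15, e16, e17, e18, e19, e20, e21, e22, e23, e24, e25, e26, Option.some.injEq, beq_iff_eq]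
  by_cases hc : 'A' ≤ c ∧ c ≤ 'Z'
  · have h1 : 65 ≤ c.toNat := by
      have := hc.1; simp only [Char.le_def, UInt32.le_iff_toNat_le] at this; simpa using this
    have h2 : c.toNat ≤ 90 := by
      have := hc.2; simp only [Char.le_def, UInt32.le_iff_toNat_le] at this; simpa using this
    have hco : Char.ofNat c.toNat = c := Char.ofNat_toNat c
    have hs : pvScore c = (c.toNat : Int) - 64 := by unfold pvScore; rw [if_pos hc]
    rw [hs, ← hco]
    interval_cases h : c.toNat <;> decide
  ·
    have nA : ¬ ('A' = c) := fun h => hc (by rw [← h]; exact ⟨by decide, by decide⟩)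
    have nB : ¬ ('B' = c) := fun h => hc (by rw [← h]; exact ⟨by decide, by decide⟩)
    have nC : ¬ ('C' = c) := fun h => hc (by rw [← h]; exact ⟨by decide, by decide⟩)
    have nD : ¬ ('D' = c) := fun h => hc (by rw [← h]; exact ⟨by decide, by decide⟩)
    have nE : ¬ ('E' = c) := fun h => hc (by rw [← h]; exact ⟨by decide, by decide⟩)
    have nF : ¬ ('F' = c) := fun h => hc (by rw [← h]; exact ⟨by decide, by decide⟩)
    have nG : ¬ ('G' = c) := fun h => hc (by rw [← h]; exact ⟨by decide, by decide⟩)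
    have nH : ¬ ('H' = c) := fun h => hc (by rw [← h]; exact ⟨by decide, by decide⟩)
    have nI : ¬ ('I' = c) := fun h => hc (by rw [← h]; exact ⟨by decide, by decide⟩)
    have nJ : ¬ ('J' = c) := fun h => hc (by rw [← h]; exact ⟨by decide, by decide⟩)
    have nK : ¬ ('K' = c) := fun h => hc (by rw [← h]; exact ⟨by decide, by decide⟩)
    have nL : ¬ ('L' = c) := fun h => hc (by rw [← h]; exact ⟨by decide, by decide⟩)
    have nM : ¬ ('M' = c) := fun h => hc (by rw [← h]; exact ⟨by decide, by decide⟩)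
    have nN : ¬ ('N' = c) := fun h => hc (by rw [← h]; exact ⟨by decide, by decide⟩)
    have nO : ¬ ('O' = c) := fun h => hc (by rw [← h]; exact ⟨by decide, by decide⟩)
    have nP : ¬ ('P' = c) := fun h => hc (by rw [← h]; exact ⟨by decide, by decide⟩)
    have nQ : ¬ ('Q' = c) := fun h => hc (by rw [← h]; exact ⟨by decide, by decide⟩)
    have nR : ¬ ('R' = c) := fun h => hc (by rw [← h]; exact ⟨by decide, by decide⟩)
    have nS : ¬ ('S' = c) := fun h => hc (by rw [← h]; exact ⟨by decide, by decide⟩)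
    have nT : ¬ ('T' = c) := fun h => hc (by rw [← h]; exact ⟨by decide, by decide⟩)
    have nU : ¬ ('U' = c) := fun h => hc (by rw [← h]; exact ⟨by decide, by decide⟩)
    have nV : ¬ ('V' = c) := fun h => hc (by rw [← h]; exact ⟨by decide, by decide⟩)
    have nW : ¬ ('W' = c) := fun h => hc (by rw [← h]; exact ⟨by decide, by decide⟩)
    have nX : ¬ ('X' = c) := fun h => hc (by rw [← h]; exact ⟨by decide, by decide⟩)
    have nY : ¬ ('Y' = c) := fun h => hc (by rw [← h]; exact ⟨by decide, by decide⟩)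
    have nZ : ¬ ('Z' = c) := fun h => hc (by rw [← h]; exact ⟨by decide, by decide⟩)
    have hz : pvScore c = 0 := by unfold pvScore; rw [if_neg hc]
    rw [hz]
    simp [if_neg nA, if_neg nB, if_neg nC, if_neg nD, if_neg nE, if_neg nF, if_neg nG, if_neg nH, if_neg nI, if_neg nJ, if_neg nK, if_neg nL, if_neg nM, if_neg nN, if_neg nO, if_neg nP, if_neg nQ, if_neg nR, if_neg nS, if_neg nT, if_neg nU, if_neg nV, if_neg nW, if_neg nX, if_neg nY, if_neg nZ]

theorem outer_fold (cs : List Char) (init : Int) :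
    (PySem.List.pyRange 0 (cs.length : Int) 1).foldl (fun count h =>
      (PySem.List.pyRange 0 (PySem.Str.len "0ABCDEFGHIJKLMNOPQRSTUVWXYZ") 1).foldl
        (fun count i => if PySem.Str.pyGet? "0ABCDEFGHIJKLMNOPQRSTUVWXYZ" i == PySem.List.pyGet? cs h then count + i else count) count) init
    = cs.foldl (fun acc c => acc + pvScore c) init := by
  induction cs using List.reverseRecOn generalizing init with
  | nil => simp [PySem.List.pyRange_one_eq_nil]
  | append_singleton cs c ih =>
    have hlen : (((cs ++ [c]).length : Nat) : Int) = (cs.length : Int) + 1 := by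
      simp
    rw [hlen, PySem.List.pyRange_one_succ_right (Int.natCast_nonneg _), List.foldl_append,
        List.foldl_append]
    have hpre :
        (PySem.List.pyRange 0 ((cs.length : Nat) : Int) 1).foldl (fun count h =>
          (PySem.List.pyRange 0 (PySem.Str.len "0ABCDEFGHIJKLMNOPQRSTUVWXYZ") 1).foldl
            (fun count i => if PySem.Str.pyGet? "0ABCDEFGHIJKLMNOPQRSTUVWXYZ" i == PySem.List.pyGet? (cs ++ [c]) h then count + i else count) count) init
        = (PySem.List.pyRange 0 ((cs.length : Nat) : Int) 1).foldl (fun count h =>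
          (PySem.List.pyRange 0 (PySem.Str.len "0ABCDEFGHIJKLMNOPQRSTUVWXYZ") 1).foldl
            (fun count i => if PySem.Str.pyGet? "0ABCDEFGHIJKLMNOPQRSTUVWXYZ" i == PySem.List.pyGet? cs h then count + i else count) count) init := by
      refine PySem.List.foldl_congr_mem _ _ _ _ ?_
      intro acc x hx
      obtain ⟨hx0, hxl⟩ := (PySem.List.mem_pyRange_one).1 hx
      obtain ⟨k, rfl⟩ : ∃ k : Nat, (k : Int) = x := ⟨x.toNat, by omega⟩
      have hkl : k < cs.length := by exact_mod_cast hxl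
      have hget : PySem.List.pyGet? (cs ++ [c]) (k : Int) = PySem.List.pyGet? cs (k : Int) := by
        rw [PySem.List.pyGet?_natCast, PySem.List.pyGet?_natCast, List.getElem?_append_left hkl]
      rw [hget]
    rw [hpre, ih]
    have hlast : PySem.List.pyGet? (cs ++ [c]) ((cs.length : Nat) : Int) = some c := by
      exact PySem.List.pyGet?_append_length (pre := cs) (y := c) (ys := [])
    simp only [List.foldl_cons, List.foldl_nil, hlast, inner_score]

theorem alt_eq_score_fold (a : String) :
    countLetterScore_alt a = a.toList.foldl (fun acc c => acc + pvScore c) 0 := by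
  unfold countLetterScore_alt
  refine PySem.List.foldl_congr_mem _ _ _ _ ?_
  intro acc c _
  unfold pvScore
  split_ifs <;> ring

-- ===== VERDICT (by name: the statement is the Claim_ definition above) =====
theorem countLetterScore_spec : Claim_equal_countLetterScore := by
  intro a _
  unfold Spec_countLetterScore countLetterScore
  rw [alt_eq_score_fold]
  rw [← outer_fold a.toList 0]
  simp only [PySem.Str.pyGet?_eq, PySem.Chars.pyGet?_eq_listPyGet?, PySem.Str.len_eq]
  rfl
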